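-- pv_equiv track=rewrite | github.com/JuanTrujilloM/Legal-Docs-Pipeline | Scripts/ProcessHTMLs/preprocessHTMLs.py | remove_metadata_lines
-- ===== SOURCE A (Python) =====
-- def remove_metadata_lines(body: str, source: str, subtipo: str) -> str:
--     lines = body.splitlines()
--     source = source.strip() if source else ""
--     subtipo = subtipo.strip() if subtipo else ""
--
--     cleaned = []
--     i = 0
--     while i < len(lines):
--         current = lines[i].strip()
--
--         if source and current == source:
--             i += 1
--             while i < len(lines) and not lines[i].strip():
--                 i += 1
--             continue
--
--         if subtipo and current.lower() == "subtipo:":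
--             if i + 1 < len(lines) and lines[i + 1].strip() == subtipo:
--                 i += 2
--                 while i < len(lines) and not lines[i].strip():
--                     i += 1
--                 continue
--
--         cleaned.append(lines[i])
--         i += 1
--
--     return "\n".join(cleaned)
-- ===== SOURCE B (Python) =====
-- def _handle(src, sub, line):
--     cur = line.strip()
--     if src and cur == src:
--         return True, None, []
--     if sub and cur.lower() == "subtipo:":
--         return False, line, []
--     return False, None, [line]
--
--
-- def remove_metadata_lines(body: str, source: str, subtipo: str) -> str:
--     src = source.strip() if source else ""
--     sub = subtipo.strip() if subtipo else ""
--     out = []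
--     skip_blanks = False
--     pending = None  # buffered "subtipo:" line awaiting its value line
--     for line in body.splitlines():
--         cur = line.strip()
--         if pending is not None:
--             if sub and cur == sub:
--                 pending = None
--                 skip_blanks = True
--                 continue
--             out.append(pending)
--             pending = None
--         elif skip_blanks:
--             if not cur:
--                 continue
--             skip_blanks = False
--         skip_blanks, pending, emitted = _handle(src, sub, line)
--         out.extend(emitted)
--     if pending is not None:
--         out.append(pending)
--     return "\n".join(out)
-- ===== Notes on version B (the rewrite author's own statement) =====
-- stated objective: alternative
-- what changed: Replaces A's index-based while loop with lookahead and inner blank-skipping loops by a single forward for-loop carrying state (a skip-blanks flag and a buffered pending 'subtipo:' line resolved on the next iteration, flushed at EOF).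
import Mathlib
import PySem

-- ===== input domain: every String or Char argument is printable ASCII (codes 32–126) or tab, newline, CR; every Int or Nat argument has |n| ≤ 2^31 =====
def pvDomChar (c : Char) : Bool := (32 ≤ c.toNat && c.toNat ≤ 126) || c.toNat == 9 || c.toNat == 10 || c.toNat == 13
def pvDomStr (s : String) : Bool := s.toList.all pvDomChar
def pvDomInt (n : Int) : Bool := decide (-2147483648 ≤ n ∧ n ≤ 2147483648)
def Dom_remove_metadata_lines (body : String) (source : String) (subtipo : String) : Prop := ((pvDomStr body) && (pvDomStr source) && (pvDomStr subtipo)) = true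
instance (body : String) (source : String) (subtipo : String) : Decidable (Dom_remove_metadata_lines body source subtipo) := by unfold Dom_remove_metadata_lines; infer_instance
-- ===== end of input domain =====

-- B replaces A's index-based while loop (with lookahead and inner blank-skipping loops) by a
-- single forward pass carrying state (skip-blanks flag + buffered pending "subtipo:" line);
-- same cost, different decomposition.

-- ===== PORT A =====
-- the inner `while i < len(lines) and not lines[i].strip(): i += 1` of A
def pvDropBlanks : List String → List String
  | [] => []
  | l :: rest => if PySem.Str.strip l = "" then pvDropBlanks rest else l :: rest

theorem pvDropBlanks_length_le (ls : List String) : (pvDropBlanks ls).length ≤ ls.length := by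
  induction ls with
  | nil => simp [pvDropBlanks]
  | cons l rest ih =>
    simp only [pvDropBlanks]
    split
    · simp; omega
    · simp

def pvLoopA (src sub : String) : List String → List String
  | [] => []
  | l :: rest =>
    let cur := PySem.Str.strip l
    if ¬ src = "" ∧ cur = src then
      pvLoopA src sub (pvDropBlanks rest)
    else if ¬ sub = "" ∧ PySem.Str.lower cur = "subtipo:" ∧ rest.head?.map PySem.Str.strip = some sub then
      pvLoopA src sub (pvDropBlanks rest.tail)
    else
      l :: pvLoopA src sub rest
termination_by ls => ls.length
decreasing_by
  · have := pvDropBlanks_length_le rest; simp; omega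
  · have h1 := pvDropBlanks_length_le rest.tail
    have h2 : rest.tail.length ≤ rest.length := by cases rest <;> simp
    simp; omega
  · simp

def remove_metadata_lines (body : String) (source : String) (subtipo : String) : String :=
  let lines := PySem.Str.splitlines body
  let src := if ¬ source = "" then PySem.Str.strip source else ""
  let sub := if ¬ subtipo = "" then PySem.Str.strip subtipo else ""
  PySem.Str.join "\n" (pvLoopA src sub lines)

-- ===== PORT B =====
-- B's helper _handle: classify one line, returning (skip_blanks, pending, emitted)
def pvHandle (src sub : String) (l : String) : Bool × Option String × List String :=
  let cur := PySem.Str.strip l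
  if ¬ src = "" ∧ cur = src then (true, none, [])
  else if ¬ sub = "" ∧ PySem.Str.lower cur = "subtipo:" then (false, some l, [])
  else (false, none, [l])

-- one iteration of B's for-loop over (skip_blanks, pending, out)
def pvStepB (src sub : String) (st : Bool × Option String × List String) (l : String) :
    Bool × Option String × List String :=
  let cur := PySem.Str.strip l
  match st with
  | (_, some held, out) =>
    if ¬ sub = "" ∧ cur = sub then (true, none, out)
    else
      let r := pvHandle src sub l
      (r.1, r.2.1, out ++ held :: r.2.2)
  | (skip, none, out) =>
    if skip ∧ cur = "" then (true, none, out)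
    else
      let r := pvHandle src sub l
      (r.1, r.2.1, out ++ r.2.2)

-- B's final `if pending is not None: out.append(pending)`
def pvFlush : Option String → List String
  | some h => [h]
  | none => []

def remove_metadata_lines_alt (body : String) (source : String) (subtipo : String) : String :=
  let src := if ¬ source = "" then PySem.Str.strip source else ""
  let sub := if ¬ subtipo = "" then PySem.Str.strip subtipo else ""
  let r := (PySem.Str.splitlines body).foldl (pvStepB src sub) (false, none, [])
  PySem.Str.join "\n" (r.2.2 ++ pvFlush r.2.1)

-- ===== PRECONDITION & SPEC =====
def Spec_remove_metadata_lines (body : String) (source : String) (subtipo : String) (out : String) : Prop := out = remove_metadata_lines_alt body source subtipo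
instance (body : String) (source : String) (subtipo : String) (out : String) : Decidable (Spec_remove_metadata_lines body source subtipo out) := by unfold Spec_remove_metadata_lines; infer_instance

-- ===== CLAIM (what is proved, stated in full; the proofs are below) =====
def Claim_equal_remove_metadata_lines : Prop := ∀ (body : String) (source : String) (subtipo : String), Dom_remove_metadata_lines body source subtipo → Spec_remove_metadata_lines body source subtipo (remove_metadata_lines body source subtipo)

-- ===== LEMMAS AND PROOFS =====

-- run B's loop from a given state and flush
def pvRun (src sub : String) (skip : Bool) (pending : Option String) (lines : List String) : List String :=
  let r := lines.foldl (pvStepB src sub) (skip, pending, [])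
  r.2.2 ++ pvFlush r.2.1

-- the lines A still has to process, expressed from B's state
def pvView : Bool → Option String → List String → List String
  | _, some h, lines => h :: lines
  | true, none, lines => pvDropBlanks lines
  | false, none, lines => lines

-- invariant on a buffered pending line
def pvOK (src sub : String) : Option String → Prop
  | some h => ¬ (¬ src = "" ∧ PySem.Str.strip h = src) ∧ ¬ sub = "" ∧
      PySem.Str.lower (PySem.Str.strip h) = "subtipo:"
  | none => True

theorem pvFoldl_out (src sub : String) :
    ∀ (lines : List String) (skip : Bool) (pending : Option String) (out : List String),
    lines.foldl (pvStepB src sub) (skip, pending, out) =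
      ((lines.foldl (pvStepB src sub) (skip, pending, [])).1,
       (lines.foldl (pvStepB src sub) (skip, pending, [])).2.1,
       out ++ (lines.foldl (pvStepB src sub) (skip, pending, [])).2.2) := by
  intro lines
  induction lines with
  | nil => intro skip pending out; simp
  | cons l rest ih =>
    intro skip pending out
    simp only [List.foldl_cons]
    cases pending with
    | some held =>
      simp only [pvStepB]
      split
      · rw [ih true none out, ih true none ([] : List String)]
      · rw [ih]
        simp [ih (pvHandle src sub l).1 (pvHandle src sub l).2.1 (held :: (pvHandle src sub l).2.2)]
    | none =>
      simp only [pvStepB]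
      split
      · rw [ih true none out, ih true none ([] : List String)]
      · rw [ih]
        conv_rhs => rw [show pvHandle src sub l = ((pvHandle src sub l).1, (pvHandle src sub l).2.1, (pvHandle src sub l).2.2) from rfl]
        simp [ih (pvHandle src sub l).1 (pvHandle src sub l).2.1 (pvHandle src sub l).2.2]

theorem pvRun_cons (src sub : String) (skip : Bool) (pending : Option String)
    (l : String) (rest : List String) :
    pvRun src sub skip pending (l :: rest) =
      (pvStepB src sub (skip, pending, []) l).2.2 ++
        pvRun src sub (pvStepB src sub (skip, pending, []) l).1
          (pvStepB src sub (skip, pending, []) l).2.1 rest := by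
  unfold pvRun
  simp only [List.foldl_cons]
  rw [show pvStepB src sub (skip, pending, []) l =
      ((pvStepB src sub (skip, pending, []) l).1,
       (pvStepB src sub (skip, pending, []) l).2.1,
       (pvStepB src sub (skip, pending, []) l).2.2) from rfl]
  rw [pvFoldl_out]
  simp

-- the three outcomes of pvHandle, each matched with A's step on (l :: rest)
theorem pvHandle_cases (src sub : String) (l : String) (rest : List String)
    (ih : ∀ (skip : Bool) (pending : Option String), pvOK src sub pending →
      pvRun src sub skip pending rest = pvLoopA src sub (pvView skip pending rest)) :
    (pvHandle src sub l).2.2 ++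
      pvRun src sub (pvHandle src sub l).1 (pvHandle src sub l).2.1 rest =
    pvLoopA src sub (l :: rest) := by
  by_cases h1 : ¬ src = "" ∧ PySem.Str.strip l = src
  · simp only [pvHandle, if_pos h1]
    rw [ih true none trivial]
    simp only [pvView]
    rw [pvLoopA]
    rw [if_pos h1]
    simp
  · by_cases h2 : ¬ sub = "" ∧ PySem.Str.lower (PySem.Str.strip l) = "subtipo:"
    · simp only [pvHandle, if_neg h1, if_pos h2]
      rw [ih false (some l) ⟨h1, h2.1, h2.2⟩]
      simp [pvView]
    · simp only [pvHandle, if_neg h1, if_neg h2]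
      rw [ih false none trivial]
      simp only [pvView]
      rw [pvLoopA]
      have h3 : ¬ (¬ sub = "" ∧ PySem.Str.lower (PySem.Str.strip l) = "subtipo:" ∧
          rest.head?.map PySem.Str.strip = some sub) := by
        intro ⟨a, b, _⟩; exact h2 ⟨a, b⟩
      rw [if_neg h1, if_neg h3]
      simp

theorem pvMain (src sub : String) :
    ∀ (lines : List String) (skip : Bool) (pending : Option String), pvOK src sub pending →
    pvRun src sub skip pending lines = pvLoopA src sub (pvView skip pending lines) := by
  intro lines
  induction lines with
  | nil =>
    intro skip pending hOK
    cases pending with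
    | none => cases skip <;> simp [pvRun, pvFlush, pvView, pvDropBlanks, pvLoopA]
    | some h =>
      obtain ⟨hns, hsub, hlow⟩ := hOK
      simp only [pvRun, List.foldl_nil, pvFlush, pvView]
      rw [pvLoopA]
      rw [if_neg hns]
      have : ¬ (¬ sub = "" ∧ PySem.Str.lower (PySem.Str.strip h) = "subtipo:" ∧
          (List.nil (α := String)).head?.map PySem.Str.strip = some sub) := by
        intro ⟨_, _, hc⟩; simp at hc
      rw [if_neg this]
      simp [pvLoopA]
  | cons l rest ih =>
    intro skip pending hOK
    rw [pvRun_cons]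
    cases pending with
    | some held =>
      obtain ⟨hns, hsub, hlow⟩ := hOK
      simp only [pvStepB]
      by_cases hc : ¬ sub = "" ∧ PySem.Str.strip l = sub
      · rw [if_pos hc]
        simp only [List.nil_append]
        rw [ih true none trivial]
        simp only [pvView]
        rw [pvLoopA]
        rw [if_neg hns]
        have : (¬ sub = "" ∧ PySem.Str.lower (PySem.Str.strip held) = "subtipo:" ∧
            (l :: rest).head?.map PySem.Str.strip = some sub) := by
          exact ⟨hsub, hlow, by simp [hc.2]⟩
        rw [if_pos this]
        simp
      · rw [if_neg hc]
        simp only []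
        have key := pvHandle_cases src sub l rest ih
        have hA : pvLoopA src sub (held :: l :: rest) = held :: pvLoopA src sub (l :: rest) := by
          rw [pvLoopA]
          rw [if_neg hns]
          have : ¬ (¬ sub = "" ∧ PySem.Str.lower (PySem.Str.strip held) = "subtipo:" ∧
              (l :: rest).head?.map PySem.Str.strip = some sub) := by
            intro ⟨a, _, hc2⟩
            simp only [List.head?_cons, Option.map_some, Option.some.injEq] at hc2
            exact hc ⟨a, hc2⟩
          rw [if_neg this]
        simp only [pvView]
        rw [hA, ← key]
        simp
    | none =>
      by_cases hc : skip ∧ PySem.Str.strip l = ""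
      · simp only [pvStepB, if_pos hc, List.nil_append]
        rw [ih true none trivial]
        simp only [pvView]
        rcases hc with ⟨hskip, hblank⟩
        subst hskip
        simp [pvDropBlanks, hblank]
      · simp only [pvStepB, if_neg hc]
        have key := pvHandle_cases src sub l rest ih
        have hV : pvView skip none (l :: rest) = l :: rest := by
          cases skip with
          | false => rfl
          | true =>
            have : ¬ PySem.Str.strip l = "" := by
              intro hb; exact hc ⟨rfl, hb⟩
            simp [pvView, pvDropBlanks, this]
        rw [hV, ← key]
        simp

-- ===== VERDICT (by name: the statement is the Claim_ definition above) =====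
theorem remove_metadata_lines_spec : Claim_equal_remove_metadata_lines := by
  intro body source subtipo _
  unfold Spec_remove_metadata_lines remove_metadata_lines remove_metadata_lines_alt
  have := pvMain (if ¬ source = "" then PySem.Str.strip source else "")
    (if ¬ subtipo = "" then PySem.Str.strip subtipo else "")
    (PySem.Str.splitlines body) false none trivial
  simp only [pvRun, pvView] at this
  exact (congrArg (PySem.Str.join "\n") this).symm
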